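/- GENERATED by tools/from_farm_form.py from prooffarm-gif/accepted/GifFreeExtensions.2/Lemmas.lean (a worked proof of the farm's unit `GifFreeExtensions.2`,
   accepted by the verdict) — do not edit. -/
import Gif.Spec.Units.GifFreeExtensions_2
import Gif.Spec.AllSegs

/-!
  Lemmas for the unit `GifFreeExtensions.2` (0x107dc3 … 0x107e32, entered at the loop head 0x107dd9; gifalloc.c:276-282): the loop
  of `GifFreeExtensions` from its head. The two arms of `jb 107dc3` at 0x107dfd are two theorems, each from the assertion `Head k`:

      fx2_round        `k < length`: head … `free(ep->Bytes)` … `ep++` … the head again: `Head k` → `Head (k + 1)`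
      fx2_exit         `k = length`: head … `free(*blocks)` … the two checked stores … the epilogue: `Head k` → `Returned`

  and the pure facts they use:

      fx2_end_addr     the end of the counted blocks `arr + 24 · len`, as the code computes it (a rewrite rule for the walker)
      fx2_same_append  two footprints, one after the other
      fx2_gap_hdr / fx2_gap_high / fx2_gap_low
                       the windows `free` and the stack write are gaps of the heap (`Gap0`)
      fx2_blk_mem / fx2_blk_far / fx2_owns_succ / fx2_heapAt_null / fx2_heapAt_free
                       the bytes of block `k`: owned, where they are, one round of the ownership and of the heap
      fx2_shape_frame  the list through a memory that agrees on the two cells and the counted blocks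

  TRAPS MET. (1) `fx2_end_addr …` must be passed INLINE in the facts list of `u_walk`: as a hypothesis of the context it made the
  walk run for more than six minutes. (2) In `fx2_exit` the alignment fact `he_align` is put aside (`halign`) while the slots are
  carried through `free`'s footprint: with it `u_frame` fails on the shadow window's side condition.
-/

open X86 X86.User Asan ProgX.Base ProgX.Base.Spec Gif.Spec

set_option maxRecDepth 4000
set_option maxHeartbeats 4000000

namespace Gif.Spec.GifFreeExtensions_2

/-- **The end of the counted blocks**, as the code computes it at 107DEDH … 107DF5H (`movsxd rax, [count]`, `lea rax, [rax + rax*2]`,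
`lea rax, [r13 + rax*8]`): `arr + 24 · len`, when nothing wraps. A rewrite rule for the facts list of `u_walk` (pass it INLINE: as a
hypothesis of the context it makes the walker's `omega` run for minutes). -/
theorem fx2_end_addr (arr len : Nat) (h : arr + 24 * len < 2 ^ 31) :
    UInt64.ofNat arr +
      (Word.ofBV (BitVec.signExtend 64 (BitVec.ofNat 32 len)) +
        Word.ofBV (BitVec.signExtend 64 (BitVec.ofNat 32 len)) * 2) * 8 = UInt64.ofNat (arr + 24 * len) := by
  have e1 : (BitVec.ofNat 32 len).toNat = len := by
    rw [BitVec.toNat_ofNat]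
    omega
  rw [sext32_bv (BitVec.ofNat 32 len) (by omega), e1]
  apply UInt64.toNat_inj.mp
  u_omega

/-- Two footprints, one after the other: the windows of both. -/
theorem fx2_same_append {ws1 ws2 : List Span} {m1 m2 m3 : Mem} (h1 : Mem.SameExcept ws1 m1 m2)
    (h2 : Mem.SameExcept ws2 m2 m3) : Mem.SameExcept (ws1 ++ ws2) m1 m3 := by
  intro a ha
  have k1 := h1 a (fun w hw => ha w (List.mem_append_left _ hw))
  have k2 := h2 a (fun w hw => ha w (List.mem_append_right _ hw))
  exact k2.trans k1

/-- **The state word of a live object's header meets no object of the heap** (it lies in the left red zone of its own object,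
64 bytes from every other). -/
theorem fx2_gap_hdr {H : Heap} {mem : Mem} (hok : HeapOK H mem) {p n : Nat} (hl : H.Live p n) :
    Gap0 H ⟨p - 24, p - 16⟩ := by
  obtain ⟨c, hlc⟩ := hl
  intro y hy
  simp only
  by_cases hb : y.base = p
  · left
    omega
  · have hap := hok.apart_of_base_ne hlc hy (fun e => hb e.symm)
    simp only at hap
    omega

/-- A window at or above C00000H (the shadow) meets no object of the heap. -/
theorem fx2_gap_high {H : Heap} {mem : Mem} (hok : HeapOK H mem) (w : Span) (h : 0xC00000 ≤ w.lo) : Gap0 H w := by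
  intro y hy
  have hin := hok.obj_inside hy
  right
  omega

/-- A window below 800000H (the stack) meets no object of a heap based at 800000H. -/
theorem fx2_gap_low {H : Heap} {mem : Mem} (hok : HeapOK H mem) (hb : H.base = 0x800000) (w : Span) (h : w.hi ≤ 0x800000) :
    Gap0 H w := by
  intro y hy
  have hin := hok.obj_range hy
  left
  omega

/-- The bytes of block `k`, when there are any, are among what is live after `k` rounds. -/
theorem fx2_blk_mem (ob on : Nat) (x : Exts) (k : Nat) (hk : k < x.blocks.length) (hne : (x.blocks[k]).bytes ≠ 0) :
    ((x.blocks[k]).bytes, (x.blocks[k]).len) ∈ GifFreeExtensions.liveAt ob on x k := by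
  rw [GifFreeExtensions.liveAt_succ ob on x k hk]
  apply List.mem_cons_of_mem
  apply List.mem_cons_of_mem
  apply List.mem_append_left
  unfold Blk.objs
  rw [if_neg hne]
  exact List.mem_cons_self

/-- **One round, the ownership**: after `free` of the bytes of block `k` (if any) the holder, the array and the bytes of the blocks
from `k + 1` on are live in the heap one round later. -/
theorem fx2_owns_succ {H : Heap} {ob on : Nat} {x : Exts} {k : Nat} (hk : k < x.blocks.length)
    (h : Owns (GifFreeExtensions.heapAt H x k) (GifFreeExtensions.liveAt ob on x k)) :
    Owns (GifFreeExtensions.heapAt H x (k + 1)) (GifFreeExtensions.liveAt ob on x (k + 1)) := by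
  rw [GifFreeExtensions.heapAt_succ H x k hk]
  rw [GifFreeExtensions.liveAt_succ ob on x k hk] at h
  by_cases hz : (x.blocks[k]).bytes = 0
  · have e : Blk.objs x.blocks[k] = [] := by
      unfold Blk.objs
      rw [if_pos hz]
    rw [e] at h ⊢
    exact h
  · have e : Blk.objs x.blocks[k] = [((x.blocks[k]).bytes, (x.blocks[k]).len)] := by
      unfold Blk.objs
      rw [if_neg hz]
    rw [e] at h ⊢
    simp only [List.map_cons, List.map_nil, Heap.releaseAll_cons, Heap.releaseAll_nil]
    refine h.release (n := (x.blocks[k]).len) ?_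
    unfold GifFreeExtensions.liveAt
    simp only [List.cons_append, List.nil_append]
    refine List.Perm.trans (List.Perm.cons _ (List.Perm.swap _ _ _)) ?_
    exact List.Perm.swap _ _ _

/-- The heap one round later, when block `k` has no bytes (`free(NULL)`): the same. -/
theorem fx2_heapAt_null {H : Heap} {x : Exts} {k : Nat} (hk : k < x.blocks.length) (hz : (x.blocks[k]).bytes = 0) :
    GifFreeExtensions.heapAt H x (k + 1) = GifFreeExtensions.heapAt H x k := by
  rw [GifFreeExtensions.heapAt_succ H x k hk]
  unfold Blk.objs
  rw [if_pos hz]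
  rfl

/-- The heap one round later, when block `k` has bytes: they are freed. -/
theorem fx2_heapAt_free {H : Heap} {x : Exts} {k : Nat} (hk : k < x.blocks.length) (hz : (x.blocks[k]).bytes ≠ 0) :
    GifFreeExtensions.heapAt H x (k + 1) = (GifFreeExtensions.heapAt H x k).release (x.blocks[k]).bytes := by
  rw [GifFreeExtensions.heapAt_succ H x k hk]
  unfold Blk.objs
  rw [if_neg hz]
  rfl

/-- **Where the bytes of block `k` are**: a live object, in the heap's region, 64 bytes from the holder and from the array. -/
theorem fx2_blk_far {H : Heap} {mem : Mem} {ob on : Nat} {x : Exts} {k : Nat} (hok : HeapOK H mem)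
    (hown : Owns H (GifFreeExtensions.liveAt ob on x k)) (hk : k < x.blocks.length) (hne : (x.blocks[k]).bytes ≠ 0) :
    H.Live (x.blocks[k]).bytes (x.blocks[k]).len ∧
    H.base + 64 ≤ (x.blocks[k]).bytes ∧ (x.blocks[k]).bytes + (x.blocks[k]).len + 32 ≤ 0xC00000 ∧
    (ob + on + 64 ≤ (x.blocks[k]).bytes ∨ (x.blocks[k]).bytes + (x.blocks[k]).len + 64 ≤ ob) ∧
    (x.arr + 24 * x.cap + 64 ≤ (x.blocks[k]).bytes ∨ (x.blocks[k]).bytes + (x.blocks[k]).len + 64 ≤ x.arr) := by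
  have hm := fx2_blk_mem ob on x k hk hne
  have hin := hown.inside hok hm
  have hmo : (ob, on) ∈ GifFreeExtensions.liveAt ob on x k := List.mem_cons_self
  have hma : (x.arr, 24 * x.cap) ∈ GifFreeExtensions.liveAt ob on x k := List.mem_cons_of_mem _ List.mem_cons_self
  have hap := hown.apart
  rw [GifFreeExtensions.liveAt_succ ob on x k hk] at hap
  obtain ⟨hap1, hap'⟩ := List.pairwise_cons.mp hap
  obtain ⟨hap2, _⟩ := List.pairwise_cons.mp hap'
  have hmem' : ((x.blocks[k]).bytes, (x.blocks[k]).len) ∈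
      Blk.objs x.blocks[k] ++ (x.blocks.drop (k + 1)).flatMap Blk.objs := by
    apply List.mem_append_left
    unfold Blk.objs
    rw [if_neg hne]
    exact List.mem_cons_self
  have n1 : ob ≠ (x.blocks[k]).bytes := hap1 _ (List.mem_cons_of_mem _ hmem')
  have n2 : x.arr ≠ (x.blocks[k]).bytes := hap2 _ hmem'
  have f1 := hown.far hok hmo hm (fun e => n1 (congrArg Prod.fst e))
  have f2 := hown.far hok hma hm (fun e => n2 (congrArg Prod.fst e))
  simp only at f1 f2 hin
  exact ⟨hown.live _ hm, hin.1, hin.2.2.2.2, f1, f2⟩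

/-- **The two cells and the counted blocks through a memory that agrees on them**: the list is still there. -/
theorem fx2_shape_frame {x : Exts} {cp bp : Nat} {mem mem' : Mem}
    (h : ExtsAt (some x) (rd mem bp 8) (rd mem cp 4) mem)
    (h1 : Mem.EqOn bp (bp + 8) mem mem') (h2 : Mem.EqOn cp (cp + 4) mem mem')
    (h3 : Mem.EqOn x.arr (x.arr + 24 * x.blocks.length) mem mem')
    (hb : bp + 8 < 2 ^ 64) (hc : cp + 4 < 2 ^ 64) (ha : x.arr + 24 * x.blocks.length < 2 ^ 64) :
    ExtsAt (some x) (rd mem' bp 8) (rd mem' cp 4) mem' := by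
  rw [h1.rd bp 8 (Nat.le_refl _) (Nat.le_refl _) hb, h2.rd cp 4 (Nat.le_refl _) (Nat.le_refl _) hc]
  refine h.frame ?_ ?_
  · intro o ho
    have e : o = (x.arr, 24 * x.blocks.length) := List.mem_singleton.mp ho
    rw [e]
    exact h3
  · intro y hy
    have e : x = y := Option.some.inj hy
    rw [← e]
    exact ha

/-- **ONE ROUND** (107DD9H … 107DFDH taken … 107DC3H … 107DD5H … 107DD9H; gifalloc.c:276-277), `k < length`: the checked loads of
`*blocks` and `*count` (inside the live holder), `ep < *blocks + *count` (the `jb` is taken), the checked load of `ep->Bytes`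
(inside the live array), `free` of it (NULL for a block whose allocation failed), `ep++`: the head again, one round later. -/
theorem fx2_round (Lay : Layout) (hLay : Lay.hi = 0x1000000) (μ : Microarch) (hμ : UserX.MicroOK μ) (u₀ : State)
    (hcode : HasCodeNat Lay u₀ Gif.L.GifFreeExtensions.entry Gif.Code.code_GifFreeExtensions.nat Gif.L.GifFreeExtensions.size)
    (h_load8 : Asan.SmallCheck Lay μ ProgX.Base.WayInv (ProgX.Base.CodeOK u₀) [.rax, .rcx, .rdx] 8 ProgX.Base.L.__asan_load8_noabort.entry)
    (h_load4 : Asan.SmallCheck Lay μ ProgX.Base.WayInv (ProgX.Base.CodeOK u₀) [.rax, .rcx, .rdx] 4 ProgX.Base.L.__asan_load4_noabort.entry)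
    (H : Heap) (rest : List Obj) (frames : List (Nat × FrameLayout)) (ex : Option Exts) (ob on : Nat) (x : Exts) (k : Nat)
    (e : State) (ret : Word) (v : State)
    (hk : k < x.blocks.length)
    (h_free : Calls Lay μ ProgX.Base.WayInv (ProgX.Base.conv u₀) ProgX.Base.L.free.entry
      (ProgX.Base.Spec.free.spec (GifFreeExtensions.heapAt H x k) rest frames (x.blocks[k]).len))
    (hat : GifFreeExtensions.Head H rest frames ex ob on x k u₀ e ret v) :
    ReachVia Lay μ ProgX.Base.WayInv v (GifFreeExtensions.Head H rest frames ex ob on x (k + 1) u₀ e ret) := by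
  have he := hat.entry
  v_entry he
  obtain ⟨hp, hcells⟩ := hat.pre
  have hlist := hat.list
  subst hlist
  have w_rip := hat.rip
  have c_rsp : v.reg .rsp = e.reg .rsp - 40 := hat.rsp
  have c_r12 : v.reg .r12 = e.reg .rdi := hat.r12
  have c_rbp : v.reg .rbp = e.reg .rsi := hat.rbp
  have c_rbx : v.reg .rbx = UInt64.ofNat (x.arr + 24 * k) := by
    rw [← hat.rbx, UInt64.ofNat_toNat]
  have w_kept : RegsKept [.rsp] v v := RegsKept.refl _ _
  have w_eq : Mem.EqOn ProgX.Base.L.textLo ProgX.Base.L.textHi u₀.mem v.mem := ProgX.Base.conv_code_eqOn hat.code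
  have hdf := (show abiInv _ from hat.abi).1
  have hmx := (show abiInv _ from hat.abi).2
  have hsse := ProgX.Base.sseOK_of_abiInv hat.abi
  -- where the heap after `k` rounds is: at the place of the entry's
  have hreg : SameRegion H (GifFreeExtensions.heapAt H x k) := SameRegion.releaseAll H _
  have hbase : (GifFreeExtensions.heapAt H x k).base = 0x800000 := hreg.1.trans hp.base
  have hlimit : (GifFreeExtensions.heapAt H x k).limit = 0xC00000 := hreg.2.trans hp.limit
  have hown := hat.owns
  have hhold : (GifFreeExtensions.heapAt H x k).Live ob on := hown.live (ob, on) List.mem_cons_self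
  have harr : (GifFreeExtensions.heapAt H x k).Live x.arr (24 * x.cap) :=
    hown.live (x.arr, 24 * x.cap) (List.mem_cons_of_mem _ List.mem_cons_self)
  have hhin := hown.inside hat.inv.heap (o := (ob, on)) List.mem_cons_self
  have hh1 := hhin.1
  have hh2 := hhin.2.2.2.2
  clear hhin
  have hain := hown.inside hat.inv.heap (o := (x.arr, 24 * x.cap)) (List.mem_cons_of_mem _ List.mem_cons_self)
  have ha1 := hain.1
  have ha2 := hain.2.2.2.2
  clear hain
  simp only at hh1 hh2 ha1 ha2
  rw [hbase] at hh1 ha1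
  have hcp := hcells.cpIn
  have hbp := hcells.bpIn
  obtain ⟨hptr, hcnt, hlecap, hblk⟩ := hat.shape
  have l_blocks : v.mem.readLE (e.reg .rsi) 8 = x.arr := by
    rw [rd_eq_readLE v.mem (e.reg .rsi) (e.reg .rsi).toNat 8 rfl]
    exact hptr
  have l_count : v.mem.readLE (e.reg .rdi) 4 = x.blocks.length := by
    rw [rd_eq_readLE v.mem (e.reg .rdi) (e.reg .rdi).toNat 4 rfl]
    exact hcnt
  obtain ⟨hb_cnt, hb_bytes, hb_1, hb_255⟩ := hblk k hk
  have hb_bytes' := hb_bytes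
  simp only [gfield] at hb_bytes'
  have l_bytes : v.mem.readLE (UInt64.ofNat (x.arr + 24 * k) + 8) 8 = (x.blocks[k]).bytes := by
    rw [rd_eq_readLE v.mem _ (x.arr + 24 * k + 8) 8 (by u_omega)]
    exact hb_bytes'
  have hhl : LiveIn ((GifFreeExtensions.heapAt H x k).liveObjs ++ rest) frames ob on :=
    hhold.liveIn rest frames (Nat.le_refl _) (Nat.le_refl _)
  have hal : LiveIn ((GifFreeExtensions.heapAt H x k).liveObjs ++ rest) frames x.arr (24 * x.cap) :=
    harr.liveIn rest frames (Nat.le_refl _) (Nat.le_refl _)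
  have hsmall : x.arr + 24 * x.blocks.length < 2 ^ 31 := by omega
  have hkn : (UInt64.ofNat (x.arr + 24 * k)).toNat = x.arr + 24 * k := toNat_ofNat_addr _ (by omega)
  have hln : (UInt64.ofNat (x.arr + 24 * x.blocks.length)).toNat = x.arr + 24 * x.blocks.length :=
    toNat_ofNat_addr _ (by omega)
  u_walk hcode [hμ.vendor, fx2_end_addr x.arr x.blocks.length hsmall] span [ProgX.Base.L.textLo, ProgX.Base.L.textHi] side (v_side)
  case check_107ddc =>
    -- 0x107ddc (gifalloc.c:276): the load of `*blocks`, inside the live holder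
    have hun : ShadowUntouched v.mem s_107ddc.mem := by v_untouched
    exact hhl.accSmall hat.inv.shadow hun _ 8 (by decide) (by u_omega) (by u_omega)
  case check_107de8 =>
    -- 0x107de8 (gifalloc.c:276): the load of `*count`, inside the live holder
    have hun : ShadowUntouched v.mem s_107de8.mem := by v_untouched
    exact hhl.accSmall hat.inv.shadow hun _ 4 (by decide) (by u_omega) (by u_omega)
  case check_107dc7 =>
    -- 0x107dc7 (gifalloc.c:277): the load of `ep->Bytes`, inside the live array (`k < length ≤ cap`)
    have hun : ShadowUntouched v.mem s_107dc7.mem := by v_untouched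
    have ea : (UInt64.ofNat (x.arr + 24 * k) + 8).toNat = x.arr + 24 * k + 8 := by
      u_omega
    exact hal.accSmall hat.inv.shadow hun _ 8 (by decide) (by omega) (by omega)
  case call_inv =>
    v_inv
  case pre_107dd0 =>
    -- 0x107dd0 (gifalloc.c:277) `free(ep->Bytes)`: the heap's invariant over the pushed return address; NULL or live
    have e_rsp : (s_107dd0.reg .rsp).toNat + 8 = (e.reg .rsp).toNat - 40 := by
      rw [w_rsp]
      u_omega
    refine ⟨⟨?_, hbase, hlimit, hp.text, hp.offText⟩, ?_⟩
    · rw [e_rsp, w_mem]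
      exact hat.inv.writeLE_out _ _ _ (by u_omega) (by rw [hbase]; left; u_omega) (by left; u_omega)
    · rw [w_rdi]
      by_cases hz : (x.blocks[k]).bytes = 0
      · left
        rw [hz]
        rfl
      · right
        have hf := fx2_blk_far hat.inv.heap hown hk hz
        rw [toNat_ofNat_addr _ (by omega)]
        exact hf.1
  -- 0x107dd5 (ret3): `free(ep->Bytes)` HAS RETURNED. The heap is the heap one round later
  obtain ⟨bb, hbb⟩ : ∃ bb, bb = (x.blocks[k]).bytes := ⟨_, rfl⟩
  obtain ⟨bl, hbl⟩ : ∃ bl, bl = (x.blocks[k]).len := ⟨_, rfl⟩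
  have hbb64 : bb < 2 ^ 64 := by
    rw [hbb, ← hb_bytes']
    exact rd_lt _ _ 8
  have hc64 : (UInt64.ofNat bb).toNat = bb := toNat_ofNat_addr bb hbb64
  have e_top : (s_107dd0.reg .rsp).toNat + 8 = (e.reg .rsp).toNat - 40 := by
    rw [w_rsp_107dd0]
    u_omega
  have hinv1 : HeapInv (GifFreeExtensions.heapAt H x (k + 1)) rest frames ((e.reg .rsp).toNat - 40) s_107dd0r.mem := by
    rw [← e_top]
    by_cases hz : (x.blocks[k]).bytes = 0
    · rw [fx2_heapAt_null hk hz]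
      refine (w_post.1 ?_).1
      rw [w_rdi_107dd0, hz]
      rfl
    · rw [fx2_heapAt_free hk hz]
      have hne : (s_107dd0.reg .rdi).toNat ≠ 0 := by
        rw [w_rdi_107dd0, ← hbb, hc64, hbb]
        exact hz
      have hi := w_post.2 hne
      rw [w_rdi_107dd0, ← hbb, hc64, hbb] at hi
      exact hi
  clear w_post
  -- where the bytes are: NULL, or a live object 64 bytes from the holder and from the array
  have hwhere : bb = 0 ∨
      (0x800040 ≤ bb ∧ bb + bl + 32 ≤ 0xC00000 ∧ (ob + on + 64 ≤ bb ∨ bb + bl + 64 ≤ ob) ∧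
        (x.arr + 24 * x.cap + 64 ≤ bb ∨ bb + bl + 64 ≤ x.arr)) := by
    by_cases hz : (x.blocks[k]).bytes = 0
    · left
      rw [hbb]
      exact hz
    · right
      have hf := fx2_blk_far hat.inv.heap hown hk hz
      rw [hbase] at hf
      rw [hbb, hbl]
      exact ⟨hf.2.1, hf.2.2.1, hf.2.2.2.1, hf.2.2.2.2⟩
  v_after_call w_rsp_107dd0 w_mem_107dd0
  simp only [shadowSpan, w_rdi_107dd0, ← hbb, ← hbl, hc64] at w_same
  -- the saved registers and the return address, over the pushed return address and through `free`'s footprint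
  have k_r13 : v.mem.readLE (e.reg .rsp - 8) 8 = (e.reg .r13).toNat := hat.slot_r13
  have k_r12 : v.mem.readLE (e.reg .rsp - 16) 8 = (e.reg .r12).toNat := hat.slot_r12
  have k_rbp : v.mem.readLE (e.reg .rsp - 24) 8 = (e.reg .rbp).toNat := hat.slot_rbp
  have k_rbx : v.mem.readLE (e.reg .rsp - 32) 8 = (e.reg .rbx).toNat := hat.slot_rbx
  have k_ra : UInt64.ofNat (v.mem.readLE (e.reg .rsp) 8) = ret := hat.slot_ra
  have hp13 : s_107dd0.mem.readLE (e.reg .rsp - 8) 8 = (e.reg .r13).toNat := by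
    rw [w_mem_107dd0]
    u_frame k_r13
  rw [w_mem_107dd0] at hp13
  have hs13 : s_107dd0r.mem.readLE (e.reg .rsp - 8) 8 = (e.reg .r13).toNat := by u_frame hp13
  have hp12 : s_107dd0.mem.readLE (e.reg .rsp - 16) 8 = (e.reg .r12).toNat := by
    rw [w_mem_107dd0]
    u_frame k_r12
  rw [w_mem_107dd0] at hp12
  have hs12 : s_107dd0r.mem.readLE (e.reg .rsp - 16) 8 = (e.reg .r12).toNat := by u_frame hp12
  have hpbp : s_107dd0.mem.readLE (e.reg .rsp - 24) 8 = (e.reg .rbp).toNat := by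
    rw [w_mem_107dd0]
    u_frame k_rbp
  rw [w_mem_107dd0] at hpbp
  have hsbp : s_107dd0r.mem.readLE (e.reg .rsp - 24) 8 = (e.reg .rbp).toNat := by u_frame hpbp
  have hpbx : s_107dd0.mem.readLE (e.reg .rsp - 32) 8 = (e.reg .rbx).toNat := by
    rw [w_mem_107dd0]
    u_frame k_rbx
  rw [w_mem_107dd0] at hpbx
  have hsbx : s_107dd0r.mem.readLE (e.reg .rsp - 32) 8 = (e.reg .rbx).toNat := by u_frame hpbx
  have hpra : UInt64.ofNat (s_107dd0.mem.readLE (e.reg .rsp) 8) = ret := by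
    rw [w_mem_107dd0]
    u_frame k_ra
  rw [w_mem_107dd0] at hpra
  have hsra : UInt64.ofNat (s_107dd0r.mem.readLE (e.reg .rsp) 8) = ret := by u_frame hpra
  -- what this round wrote: stack below the entry's frame, the header's state word, the shadow of the bytes
  have hvs : Mem.SameExcept
      [⟨(e.reg .rsp).toNat - 80, (e.reg .rsp).toNat - 40⟩,
       ⟨bb - 24, bb - 16⟩,
       ⟨0xC00000 + bb / 8, 0xC00000 + (bb + bl + 7) / 8⟩] v.mem s_107dd0r.mem := by u_same
  -- the two cells and the array were not written
  have q1 : Mem.EqOn (e.reg .rsi).toNat ((e.reg .rsi).toNat + 8) v.mem s_107dd0r.mem := by u_eqon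
  have q2 : Mem.EqOn (e.reg .rdi).toNat ((e.reg .rdi).toNat + 4) v.mem s_107dd0r.mem := by u_eqon
  have q3 : Mem.EqOn x.arr (x.arr + 24 * x.blocks.length) v.mem s_107dd0r.mem := by u_eqon
  have hshape1 : ExtsAt (some x) (rd s_107dd0r.mem (e.reg .rsi).toNat 8) (rd s_107dd0r.mem (e.reg .rdi).toNat 4)
      s_107dd0r.mem := fx2_shape_frame hat.shape q1 q2 q3 (by omega) (by omega) (by omega)
  -- the footprint since the entry
  have hsame0 : Mem.SameExcept
      [⟨(e.reg .rsp).toNat - 80, (e.reg .rsp).toNat⟩,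
       ⟨0x800000, 0x1000020⟩] e.mem v.mem := hat.same
  have hsame1 : Mem.SameExcept
      [⟨(e.reg .rsp).toNat - 80, (e.reg .rsp).toNat⟩,
       ⟨0x800000, 0x1000020⟩] e.mem s_107dd0r.mem := by u_same
  -- the footprint since the entry as the contract's post wants it: gap windows only
  have hgaps1 : ∃ ws, Mem.SameExcept ws e.mem s_107dd0r.mem ∧ ∀ w, w ∈ ws → GifFreeExtensions.GapWin H e w := by
    obtain ⟨ws0, hws0, hgw0⟩ := hat.gaps
    have hstack : GifFreeExtensions.GapWin H e ⟨(e.reg .rsp).toNat - 80, (e.reg .rsp).toNat - 40⟩ := by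
      refine ⟨fx2_gap_low hp.inv.heap hp.base _ ?_, Or.inr ⟨?_, ?_⟩⟩
      · simp only
        omega
      · simp only
        omega
      · simp only
        omega
    have hshad : GifFreeExtensions.GapWin H e ⟨0xC00000 + bb / 8, 0xC00000 + (bb + bl + 7) / 8⟩ := by
      refine ⟨fx2_gap_high hp.inv.heap _ ?_, Or.inl ?_⟩
      · simp only
        omega
      · simp only
        omega
    rcases hwhere with hz | hnz
    · -- `free(NULL)`: the header window is empty, and is left out
      refine ⟨ws0 ++ [⟨(e.reg .rsp).toNat - 80, (e.reg .rsp).toNat - 40⟩,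
        ⟨0xC00000 + bb / 8, 0xC00000 + (bb + bl + 7) / 8⟩], fx2_same_append hws0 ?_, ?_⟩
      · refine hvs.mono ?_
        intro w hw a h1 h2
        rcases List.mem_cons.mp hw with rfl | hw
        · exact ⟨_, List.mem_cons_self, h1, h2⟩
        · rcases List.mem_cons.mp hw with rfl | hw
          · simp only at h1 h2
            omega
          · have ew := List.mem_singleton.mp hw
            subst ew
            exact ⟨_, List.mem_cons_of_mem _ List.mem_cons_self, h1, h2⟩
      · intro w hw
        rcases List.mem_append.mp hw with h0 | h1
        · exact hgw0 w h0
        · rcases List.mem_cons.mp h1 with rfl | h1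
          · exact hstack
          · have ew := List.mem_singleton.mp h1
            subst ew
            exact hshad
    · -- the bytes are freed: the state word of their header is a gap of the heap
      have hbne : (x.blocks[k]).bytes ≠ 0 := by
        rw [← hbb]
        omega
      have hlive := (fx2_blk_far hat.inv.heap hown hk hbne).1
      rw [← hbb, ← hbl] at hlive
      have hhdr : GifFreeExtensions.GapWin H e ⟨bb - 24, bb - 16⟩ := by
        refine ⟨(GifFreeExtensions.gap0_releaseAll H _ _).mp (fx2_gap_hdr hat.inv.heap hlive), Or.inl ?_⟩
        simp only
        omega
      refine ⟨ws0 ++ [⟨(e.reg .rsp).toNat - 80, (e.reg .rsp).toNat - 40⟩, ⟨bb - 24, bb - 16⟩,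
        ⟨0xC00000 + bb / 8, 0xC00000 + (bb + bl + 7) / 8⟩], fx2_same_append hws0 hvs, ?_⟩
      intro w hw
      rcases List.mem_append.mp hw with h0 | h1
      · exact hgw0 w h0
      · rcases List.mem_cons.mp h1 with rfl | h1
        · exact hstack
        · rcases List.mem_cons.mp h1 with rfl | h1
          · exact hhdr
          · have ew := List.mem_singleton.mp h1
            subst ew
            exact hshad
  clear hvs w_same
  -- 0x107dd5 `add rbx, 24` (gifalloc.c:276 `ep++`), to the head
  u_walk hcode [hμ.vendor] until [Gif.L.GifFreeExtensions.loop1] span [ProgX.Base.L.textLo, ProgX.Base.L.textHi] side (v_side)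
  -- 0x107dd9: THE HEAD AGAIN, one round later
  refine ReachVia.done ?_
  exact {
    entry := hat.entry
    pre := hat.pre
    list := rfl
    le := hk
    rip := w_rip
    rsp := w_rsp
    r12 := (w_kept.get .r12 rfl).trans c_r12
    rbp := (w_kept.get .rbp rfl).trans c_rbp
    rbx := by
      rw [w_rbx]
      u_omega
    r14 := (w_kept.get .r14 rfl).trans hat.r14
    r15 := (w_kept.get .r15 rfl).trans hat.r15
    slot_r13 := by
      rw [w_mem]
      exact hs13
    slot_r12 := by
      rw [w_mem]
      exact hs12
    slot_rbp := by
      rw [w_mem]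
      exact hsbp
    slot_rbx := by
      rw [w_mem]
      exact hsbx
    slot_ra := by
      rw [w_mem]
      exact hsra
    inv := by
      rw [w_mem]
      exact hinv1
    owns := fx2_owns_succ hk hown
    shape := by
      rw [w_mem]
      exact hshape1
    gaps := by
      rw [w_mem]
      exact hgaps1
    same := by
      rw [w_mem]
      exact hsame1
    code := ProgX.Base.conv_code_in w_eq
    abi := by
      v_inv
  }

/-- **THE EXIT** (107DD9H … 107DFDH not taken … 107DFFH … the `ret`; gifalloc.c:276, 279-282), `k = length`: the two checked loads,
`ep = *blocks + *count` (the `jb` falls through), `free(*blocks)` (the array, still live), the checked stores `*blocks = NULL`,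
`*count = 0` (inside the holder, still live), the epilogue: `Returned` with the contract's final heap (`heapAt_end`) and the
footprint as gap windows plus the two cells. -/
theorem fx2_exit (Lay : Layout) (hLay : Lay.hi = 0x1000000) (μ : Microarch) (hμ : UserX.MicroOK μ) (u₀ : State)
    (hcode : HasCodeNat Lay u₀ Gif.L.GifFreeExtensions.entry Gif.Code.code_GifFreeExtensions.nat Gif.L.GifFreeExtensions.size)
    (h_load8 : Asan.SmallCheck Lay μ ProgX.Base.WayInv (ProgX.Base.CodeOK u₀) [.rax, .rcx, .rdx] 8 ProgX.Base.L.__asan_load8_noabort.entry)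
    (h_load4 : Asan.SmallCheck Lay μ ProgX.Base.WayInv (ProgX.Base.CodeOK u₀) [.rax, .rcx, .rdx] 4 ProgX.Base.L.__asan_load4_noabort.entry)
    (h_store8 : Asan.SmallCheck Lay μ ProgX.Base.WayInv (ProgX.Base.CodeOK u₀) [.rax, .rcx, .rdx] 8 ProgX.Base.L.__asan_store8_noabort.entry)
    (h_store4 : Asan.SmallCheck Lay μ ProgX.Base.WayInv (ProgX.Base.CodeOK u₀) [.rax, .rcx, .rdx] 4 ProgX.Base.L.__asan_store4_noabort.entry)
    (H : Heap) (rest : List Obj) (frames : List (Nat × FrameLayout)) (ex : Option Exts) (ob on : Nat) (x : Exts) (k : Nat)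
    (e : State) (ret : Word) (v : State)
    (hk : k = x.blocks.length)
    (h_free : Calls Lay μ ProgX.Base.WayInv (ProgX.Base.conv u₀) ProgX.Base.L.free.entry
      (ProgX.Base.Spec.free.spec (GifFreeExtensions.heapAt H x k) rest frames (24 * x.cap)))
    (hat : GifFreeExtensions.Head H rest frames ex ob on x k u₀ e ret v) :
    ReachVia Lay μ ProgX.Base.WayInv v
      (Returned (conv u₀) (GifFreeExtensions.spec H rest frames ex ob on) e ret) := by
  have he := hat.entry
  v_entry he
  obtain ⟨hp, hcells⟩ := hat.pre
  have hlist := hat.list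
  subst hlist
  have w_rip := hat.rip
  have c_rsp : v.reg .rsp = e.reg .rsp - 40 := hat.rsp
  have c_r12 : v.reg .r12 = e.reg .rdi := hat.r12
  have c_rbp : v.reg .rbp = e.reg .rsi := hat.rbp
  have c_rbx : v.reg .rbx = UInt64.ofNat (x.arr + 24 * k) := by
    rw [← hat.rbx, UInt64.ofNat_toNat]
  have w_kept : RegsKept [.rsp] v v := RegsKept.refl _ _
  have w_eq : Mem.EqOn ProgX.Base.L.textLo ProgX.Base.L.textHi u₀.mem v.mem := ProgX.Base.conv_code_eqOn hat.code
  have hdf := (show abiInv _ from hat.abi).1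
  have hmx := (show abiInv _ from hat.abi).2
  have hsse := ProgX.Base.sseOK_of_abiInv hat.abi
  -- where the heap after `k` rounds is: at the place of the entry's
  have hreg : SameRegion H (GifFreeExtensions.heapAt H x k) := SameRegion.releaseAll H _
  have hbase : (GifFreeExtensions.heapAt H x k).base = 0x800000 := hreg.1.trans hp.base
  have hlimit : (GifFreeExtensions.heapAt H x k).limit = 0xC00000 := hreg.2.trans hp.limit
  have hown := hat.owns
  have hhold : (GifFreeExtensions.heapAt H x k).Live ob on := hown.live (ob, on) List.mem_cons_self
  have harr : (GifFreeExtensions.heapAt H x k).Live x.arr (24 * x.cap) :=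
    hown.live (x.arr, 24 * x.cap) (List.mem_cons_of_mem _ List.mem_cons_self)
  have hhin := hown.inside hat.inv.heap (o := (ob, on)) List.mem_cons_self
  have hh1 := hhin.1
  have hh2 := hhin.2.2.2.2
  clear hhin
  have hain := hown.inside hat.inv.heap (o := (x.arr, 24 * x.cap)) (List.mem_cons_of_mem _ List.mem_cons_self)
  have ha1 := hain.1
  have ha2 := hain.2.2.2.2
  clear hain
  simp only at hh1 hh2 ha1 ha2
  rw [hbase] at hh1 ha1
  have hcp := hcells.cpIn
  have hbp := hcells.bpIn
  obtain ⟨hptr, hcnt, hlecap, hblk⟩ := hat.shape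
  have l_blocks : v.mem.readLE (e.reg .rsi) 8 = x.arr := by
    rw [rd_eq_readLE v.mem (e.reg .rsi) (e.reg .rsi).toNat 8 rfl]
    exact hptr
  have l_count : v.mem.readLE (e.reg .rdi) 4 = x.blocks.length := by
    rw [rd_eq_readLE v.mem (e.reg .rdi) (e.reg .rdi).toNat 4 rfl]
    exact hcnt
  have hhl : LiveIn ((GifFreeExtensions.heapAt H x k).liveObjs ++ rest) frames ob on :=
    hhold.liveIn rest frames (Nat.le_refl _) (Nat.le_refl _)
  have hsmall : x.arr + 24 * x.blocks.length < 2 ^ 31 := by omega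
  have hkn : (UInt64.ofNat (x.arr + 24 * k)).toNat = x.arr + 24 * k := toNat_ofNat_addr _ (by omega)
  have hln : (UInt64.ofNat (x.arr + 24 * x.blocks.length)).toNat = x.arr + 24 * x.blocks.length :=
    toNat_ofNat_addr _ (by omega)
  have han : (UInt64.ofNat x.arr).toNat = x.arr := toNat_ofNat_addr _ (by omega)
  u_walk hcode [hμ.vendor, fx2_end_addr x.arr x.blocks.length hsmall] span [ProgX.Base.L.textLo, ProgX.Base.L.textHi] side (v_side)
  case check_107ddc =>
    -- 0x107ddc (gifalloc.c:276): the load of `*blocks`, inside the live holder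
    have hun : ShadowUntouched v.mem s_107ddc.mem := by v_untouched
    exact hhl.accSmall hat.inv.shadow hun _ 8 (by decide) (by u_omega) (by u_omega)
  case check_107de8 =>
    -- 0x107de8 (gifalloc.c:276): the load of `*count`, inside the live holder
    have hun : ShadowUntouched v.mem s_107de8.mem := by v_untouched
    exact hhl.accSmall hat.inv.shadow hun _ 4 (by decide) (by u_omega) (by u_omega)
  case call_inv =>
    v_inv
  case pre_107e02 =>
    -- 0x107e02 (gifalloc.c:279) `free(*blocks)`: the heap's invariant over the pushed return address; the array is live
    have e_rsp : (s_107e02.reg .rsp).toNat + 8 = (e.reg .rsp).toNat - 40 := by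
      rw [w_rsp]
      u_omega
    refine ⟨⟨?_, hbase, hlimit, hp.text, hp.offText⟩, Or.inr ?_⟩
    · rw [e_rsp, w_mem]
      exact hat.inv.writeLE_out _ _ _ (by u_omega) (by rw [hbase]; left; u_omega) (by left; u_omega)
    · rw [w_rdi, han]
      exact harr
  -- 0x107e07 (ret6): `free(*blocks)` HAS RETURNED. The heap is the contract's final heap
  have e_top : (s_107e02.reg .rsp).toNat + 8 = (e.reg .rsp).toNat - 40 := by
    rw [w_rsp_107e02]
    u_omega
  have hinv1 : HeapInv ((GifFreeExtensions.heapAt H x k).release x.arr) rest frames ((e.reg .rsp).toNat - 40)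
      s_107e02r.mem := by
    rw [← e_top]
    have hne : (s_107e02.reg .rdi).toNat ≠ 0 := by
      rw [w_rdi_107e02, han]
      omega
    have hi := w_post.2 hne
    rw [w_rdi_107e02, han] at hi
    exact hi
  clear w_post
  v_after_call w_rsp_107e02 w_mem_107e02
  simp only [shadowSpan, w_rdi_107e02, han] at w_same
  -- (the alignment fact is put aside: with it `omega` gives up on the shadow window's side conditions)
  have halign : True → (e.reg .rsp).toNat % 8 = 0 := fun _ => he_align
  clear he_align
  -- the saved registers and the return address, over the pushed return address and through `free`'s footprint
  have k_r13 : v.mem.readLE (e.reg .rsp - 8) 8 = (e.reg .r13).toNat := hat.slot_r13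
  have k_r12 : v.mem.readLE (e.reg .rsp - 16) 8 = (e.reg .r12).toNat := hat.slot_r12
  have k_rbp : v.mem.readLE (e.reg .rsp - 24) 8 = (e.reg .rbp).toNat := hat.slot_rbp
  have k_rbx : v.mem.readLE (e.reg .rsp - 32) 8 = (e.reg .rbx).toNat := hat.slot_rbx
  have k_ra : UInt64.ofNat (v.mem.readLE (e.reg .rsp) 8) = ret := hat.slot_ra
  have hp13 : s_107e02.mem.readLE (e.reg .rsp - 8) 8 = (e.reg .r13).toNat := by
    rw [w_mem_107e02]
    u_frame k_r13
  rw [w_mem_107e02] at hp13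
  have hs13 : s_107e02r.mem.readLE (e.reg .rsp - 8) 8 = (e.reg .r13).toNat := by u_frame hp13
  have hp12 : s_107e02.mem.readLE (e.reg .rsp - 16) 8 = (e.reg .r12).toNat := by
    rw [w_mem_107e02]
    u_frame k_r12
  rw [w_mem_107e02] at hp12
  have hs12 : s_107e02r.mem.readLE (e.reg .rsp - 16) 8 = (e.reg .r12).toNat := by u_frame hp12
  have hpbp : s_107e02.mem.readLE (e.reg .rsp - 24) 8 = (e.reg .rbp).toNat := by
    rw [w_mem_107e02]
    u_frame k_rbp
  rw [w_mem_107e02] at hpbp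
  have hsbp : s_107e02r.mem.readLE (e.reg .rsp - 24) 8 = (e.reg .rbp).toNat := by u_frame hpbp
  have hpbx : s_107e02.mem.readLE (e.reg .rsp - 32) 8 = (e.reg .rbx).toNat := by
    rw [w_mem_107e02]
    u_frame k_rbx
  rw [w_mem_107e02] at hpbx
  have hsbx : s_107e02r.mem.readLE (e.reg .rsp - 32) 8 = (e.reg .rbx).toNat := by u_frame hpbx
  have hpra : UInt64.ofNat (s_107e02.mem.readLE (e.reg .rsp) 8) = ret := by
    rw [w_mem_107e02]
    u_frame k_ra
  rw [w_mem_107e02] at hpra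
  have hsra : UInt64.ofNat (s_107e02r.mem.readLE (e.reg .rsp) 8) = ret := by u_frame hpra
  -- what the `free` wrote: stack below the entry's frame, the header's state word, the shadow of the array
  have hvs : Mem.SameExcept
      [⟨(e.reg .rsp).toNat - 80, (e.reg .rsp).toNat - 40⟩,
       ⟨x.arr - 24, x.arr - 16⟩,
       ⟨0xC00000 + x.arr / 8, 0xC00000 + (x.arr + 24 * x.cap + 7) / 8⟩] v.mem s_107e02r.mem := by u_same
  -- the footprint since the entry
  have hsame0 : Mem.SameExcept
      [⟨(e.reg .rsp).toNat - 80, (e.reg .rsp).toNat⟩,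
       ⟨0x800000, 0x1000020⟩] e.mem v.mem := hat.same
  have hsame1 : Mem.SameExcept
      [⟨(e.reg .rsp).toNat - 80, (e.reg .rsp).toNat⟩,
       ⟨0x800000, 0x1000020⟩] e.mem s_107e02r.mem := by u_same
  -- … and as the contract's post wants it: gap windows only, so far
  have hgaps1 : ∃ ws, Mem.SameExcept ws e.mem s_107e02r.mem ∧ ∀ w, w ∈ ws → GifFreeExtensions.GapWin H e w := by
    obtain ⟨ws0, hws0, hgw0⟩ := hat.gaps
    have hstack : GifFreeExtensions.GapWin H e ⟨(e.reg .rsp).toNat - 80, (e.reg .rsp).toNat - 40⟩ := by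
      refine ⟨fx2_gap_low hp.inv.heap hp.base _ ?_, Or.inr ⟨?_, ?_⟩⟩
      · simp only
        omega
      · simp only
        omega
      · simp only
        omega
    have hshad : GifFreeExtensions.GapWin H e
        ⟨0xC00000 + x.arr / 8, 0xC00000 + (x.arr + 24 * x.cap + 7) / 8⟩ := by
      refine ⟨fx2_gap_high hp.inv.heap _ ?_, Or.inl ?_⟩
      · simp only
        omega
      · simp only
        omega
    have hhdr : GifFreeExtensions.GapWin H e ⟨x.arr - 24, x.arr - 16⟩ := by
      refine ⟨(GifFreeExtensions.gap0_releaseAll H _ _).mp (fx2_gap_hdr hat.inv.heap harr), Or.inl ?_⟩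
      simp only
      omega
    refine ⟨ws0 ++ [⟨(e.reg .rsp).toNat - 80, (e.reg .rsp).toNat - 40⟩, ⟨x.arr - 24, x.arr - 16⟩,
      ⟨0xC00000 + x.arr / 8, 0xC00000 + (x.arr + 24 * x.cap + 7) / 8⟩], fx2_same_append hws0 hvs, ?_⟩
    intro w hw
    rcases List.mem_append.mp hw with h0 | h1
    · exact hgw0 w h0
    · rcases List.mem_cons.mp h1 with rfl | h1
      · exact hstack
      · rcases List.mem_cons.mp h1 with rfl | h1
        · exact hhdr
        · have ew := List.mem_singleton.mp h1
          subst ew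
          exact hshad
  clear hvs w_same
  -- the holder is still live: it is not the array
  have hne_oa : ob ≠ x.arr := by
    have hap := hown.apart
    obtain ⟨hap1, _⟩ := List.pairwise_cons.mp hap
    exact hap1 (x.arr, 24 * x.cap) List.mem_cons_self
  have hhold2 : ((GifFreeExtensions.heapAt H x k).release x.arr).Live ob on := hhold.release_ne hne_oa
  have hhl2 : LiveIn (((GifFreeExtensions.heapAt H x k).release x.arr).liveObjs ++ rest) frames ob on :=
    hhold2.liveIn rest frames (Nat.le_refl _) (Nat.le_refl _)
  -- the slots, as the pops read them
  have l_r13 : UInt64.ofNat (s_107e02r.mem.readLE (e.reg .rsp - 8) 8) = e.reg .r13 := by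
    rw [hs13, UInt64.ofNat_toNat]
  have l_r12 : UInt64.ofNat (s_107e02r.mem.readLE (e.reg .rsp - 16) 8) = e.reg .r12 := by
    rw [hs12, UInt64.ofNat_toNat]
  have l_rbp : UInt64.ofNat (s_107e02r.mem.readLE (e.reg .rsp - 24) 8) = e.reg .rbp := by
    rw [hsbp, UInt64.ofNat_toNat]
  have l_rbx : UInt64.ofNat (s_107e02r.mem.readLE (e.reg .rsp - 32) 8) = e.reg .rbx := by
    rw [hsbx, UInt64.ofNat_toNat]
  have he_align := halign trivial
  clear halign
  -- 0x107e07 … the `ret` (gifalloc.c:280-282): the two checked stores into the cells, the epilogue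
  u_walk hcode [hμ.vendor] span [ProgX.Base.L.textLo, ProgX.Base.L.textHi] side (v_side)
  case check_107e0a =>
    -- 0x107e0a (gifalloc.c:280): the store of `*blocks = NULL`, inside the holder, still live
    have hun : ShadowUntouched s_107e02r.mem s_107e0a.mem := by v_untouched
    exact hhl2.accSmall hinv1.shadow hun _ 8 (by decide) (by u_omega) (by u_omega)
  case check_107e1a =>
    -- 0x107e1a (gifalloc.c:281): the store of `*count = 0`, inside the holder
    have hun : ShadowUntouched s_107e02r.mem s_107e1a.mem := by v_untouched
    exact hhl2.accSmall hinv1.shadow hun _ 4 (by decide) (by u_omega) (by u_omega)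
  -- 0x107e31 `ret` (gifalloc.c:282): RETURNED
  have hbase2 : ((GifFreeExtensions.heapAt H x k).release x.arr).base = 0x800000 := hbase
  have hapart := hcells.apartCells
  -- the heap's invariant through the two pushed return addresses (stack) and the two stores (inside the live holder)
  have hinvF : HeapInv ((GifFreeExtensions.heapAt H x k).release x.arr) rest frames ((e.reg .rsp).toNat - 40)
      s_107e31.mem := by
    rw [w_mem]
    have i1 := hinv1.writeLE_out (e.reg .rsp - 48) 8 1080847 (by u_omega) (by rw [hbase2]; left; u_omega)
      (by left; u_omega)
    have i2 := i1.writeLE_live hhold2 (e.reg .rsi) 8 0 (by omega) (by omega)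
    have i3 := i2.writeLE_out (e.reg .rsp - 48) 8 1080863 (by u_omega) (by rw [hbase2]; left; u_omega)
      (by left; u_omega)
    exact i3.writeLE_live hhold2 (e.reg .rdi) 4 0 (by omega) (by omega)
  -- what the tail wrote: the stack slot of the checks' return addresses, the two cells
  have hlast : Mem.SameExcept
      [⟨(e.reg .rsp).toNat - 80, (e.reg .rsp).toNat - 40⟩,
       ⟨(e.reg .rsi).toNat, (e.reg .rsi).toNat + 8⟩,
       ⟨(e.reg .rdi).toNat, (e.reg .rdi).toNat + 4⟩] s_107e02r.mem s_107e31.mem := by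
    rw [w_mem]
    u_same
  refine ReachVia.done ?_
  refine X86.User.Returned.mk w_rip w_rsp ?_ ?_ (ProgX.Base.conv_code_in w_eq) ?_ ⟨?_, ?_, ?_, ?_⟩
  · -- saved: four pops, `r14` / `r15` never written
    intro r hr
    cases r <;> first
      | exact absurd hr (by decide)
      | (with_reducible assumption)
      | exact (w_kept.get .r14 rfl).trans hat.r14
      | exact (w_kept.get .r15 rfl).trans hat.r15
  · -- same: the function's stack frame and the heap's region with the shadow
    simp only [X86.User.Spec.footprint, vspec]
    rw [w_mem]
    u_same
  · v_inv
  · -- the final heap: every object of the list freed, the array last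
    rw [← GifFreeExtensions.heapAt_end, ← hk]
    exact hp.raise_back hinvF (by omega)
  · -- `*blocks = NULL`
    rw [w_mem]
    rw [rd_writeLE_disjoint _ _ _ _ _ _ (by u_omega) (by omega) (by omega)]
    rw [rd_writeLE_disjoint _ _ _ _ _ _ (by u_omega) (by omega) (by u_omega)]
    rw [rd_writeLE_same _ (e.reg .rsi) 8 0 _ rfl (by decide)]
  · -- `*count = 0`
    rw [w_mem]
    rw [rd_writeLE_same _ (e.reg .rdi) 4 0 _ rfl (by decide)]
  · -- the footprint: the gap windows so far, the checks' stack slot, the two cells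
    obtain ⟨ws1, hws1, hgw1⟩ := hgaps1
    refine ⟨ws1 ++ [⟨(e.reg .rsp).toNat - 80, (e.reg .rsp).toNat - 40⟩,
      ⟨(e.reg .rsi).toNat, (e.reg .rsi).toNat + 8⟩,
      ⟨(e.reg .rdi).toNat, (e.reg .rdi).toNat + 4⟩], fx2_same_append hws1 hlast, ?_⟩
    intro w hw
    rcases List.mem_append.mp hw with h0 | h1
    · exact Or.inr (Or.inr (hgw1 w h0))
    · rcases List.mem_cons.mp h1 with rfl | h1
      · right
        right
        refine ⟨fx2_gap_low hp.inv.heap hp.base _ ?_, Or.inr ⟨?_, ?_⟩⟩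
        · simp only
          omega
        · simp only
          omega
        · simp only
          omega
      · rcases List.mem_cons.mp h1 with rfl | h1
        · right
          left
          exact ⟨rfl, rfl⟩
        · have ew := List.mem_singleton.mp h1
          subst ew
          left
          exact ⟨rfl, rfl⟩

end Gif.Spec.GifFreeExtensions_2
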